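-- pv_equiv track=rewrite | github.com/edayot/advent-of-code | 2025/day8/part1.py | all_possible_connections
-- ===== SOURCE A (Python) =====
-- from typing import NamedTuple
--
-- class Junction(NamedTuple):
--     x: int
--     y: int
--     z: int
--
-- def all_possible_connections(data: list[Junction]):
--     already = set()
--     for j1 in data:
--         for j2 in data:
--             if (j1 == j2):
--                 continue
--             if (j1, j2) in already or (j2, j1) in already:
--                 continue
--             x = j1, j2
--             already.add(x)
--             yield x
-- ===== SOURCE B (Python) =====
-- def all_possible_connections(data):
--     # Dedup by value, keeping first occurrences in order, then emit each
--     # unordered pair exactly once with a plain head-vs-rest sweep.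
--     seen = set()
--     uniq = []
--     for j in data:
--         if j not in seen:
--             seen.add(j)
--             uniq.append(j)
--     while uniq:
--         x = uniq.pop(0)
--         for y in uniq:
--             yield (x, y)
-- ===== Notes on version B (the rewrite author's own statement) =====
-- stated objective: simpler
-- what changed: B deduplicates the junction list once up front (first occurrences, tracked in a set) and then emits pairs with a plain head-vs-rest sweep, instead of A's nested loop over the full list with a symmetric-pair membership check against a growing 'already' set on every iteration.
import Mathlib
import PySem

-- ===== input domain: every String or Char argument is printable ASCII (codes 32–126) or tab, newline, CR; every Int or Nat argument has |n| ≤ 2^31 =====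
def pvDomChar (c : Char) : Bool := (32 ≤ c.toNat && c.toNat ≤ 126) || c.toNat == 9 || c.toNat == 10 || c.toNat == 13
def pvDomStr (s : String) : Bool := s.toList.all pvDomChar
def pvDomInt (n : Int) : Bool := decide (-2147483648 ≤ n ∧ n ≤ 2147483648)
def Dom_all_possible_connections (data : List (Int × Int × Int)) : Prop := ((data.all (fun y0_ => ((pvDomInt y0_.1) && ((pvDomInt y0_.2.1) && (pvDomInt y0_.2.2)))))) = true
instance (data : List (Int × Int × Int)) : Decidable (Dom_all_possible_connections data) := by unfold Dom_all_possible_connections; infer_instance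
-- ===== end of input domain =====

-- B first builds the deduplicated junction list once, then emits pairs head-vs-rest
-- with no membership test in the pairing loop (objective: simpler; return value only —
-- A is a generator, B yields the same sequence).

-- ===== PORT A =====
-- inner 'for j2 in data' loop: state = (already, yielded-so-far in order)
def pvInnerA (j1 : Int × Int × Int) :
    List (Int × Int × Int) → PySem.Set ((Int × Int × Int) × (Int × Int × Int)) →
    PySem.Set ((Int × Int × Int) × (Int × Int × Int)) × List ((Int × Int × Int) × (Int × Int × Int))
  | [], s => (s, [])
  | j2 :: rest, s =>
    if j1 = j2 then pvInnerA j1 rest s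
    else if PySem.Set.contains s (j1, j2) || PySem.Set.contains s (j2, j1) then pvInnerA j1 rest s
    else
      let s' := PySem.Set.add s (j1, j2)
      let r := pvInnerA j1 rest s'
      (r.1, (j1, j2) :: r.2)

-- outer 'for j1 in data' loop
def pvOuterA (data : List (Int × Int × Int)) :
    List (Int × Int × Int) → PySem.Set ((Int × Int × Int) × (Int × Int × Int)) →
    List ((Int × Int × Int) × (Int × Int × Int))
  | [], _ => []
  | j1 :: rest, s =>
    let r := pvInnerA j1 data s
    r.2 ++ pvOuterA data rest r.1

def all_possible_connections (data : List (Int × Int × Int)) : List ((Int × Int × Int) × (Int × Int × Int)) :=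
  pvOuterA data data PySem.Set.empty

-- ===== PORT B =====
-- 'while uniq: x = uniq.pop(0); for y in uniq: yield (x, y)'
def pvPairsB : List (Int × Int × Int) → List ((Int × Int × Int) × (Int × Int × Int))
  | [] => []
  | x :: rest => rest.map (fun y => (x, y)) ++ pvPairsB rest

def all_possible_connections_alt (data : List (Int × Int × Int)) : List ((Int × Int × Int) × (Int × Int × Int)) :=
  -- 'for j in data: if j not in seen: seen.add(j); uniq.append(j)'
  let st := data.foldl
    (fun (st : PySem.Set (Int × Int × Int) × List (Int × Int × Int)) j =>
      if PySem.Set.contains st.1 j then st else (PySem.Set.add st.1 j, st.2 ++ [j]))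
    (PySem.Set.empty, [])
  pvPairsB st.2

-- ===== PRECONDITION & SPEC =====
def Spec_all_possible_connections (data : List (Int × Int × Int)) (out : List ((Int × Int × Int) × (Int × Int × Int))) : Prop := out = all_possible_connections_alt data
instance (data : List (Int × Int × Int)) (out : List ((Int × Int × Int) × (Int × Int × Int))) : Decidable (Spec_all_possible_connections data out) := by unfold Spec_all_possible_connections; infer_instance

-- ===== CLAIM (what is proved, stated in full; the proofs are below) =====
def Claim_equal_all_possible_connections : Prop := ∀ (data : List (Int × Int × Int)), Dom_all_possible_connections data → Spec_all_possible_connections data (all_possible_connections data)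

-- ===== LEMMAS AND PROOFS =====

-- abstract "dedup keeping first occurrences, given already-seen list" (proof-side model)
def dGo (seen : List (Int × Int × Int)) : List (Int × Int × Int) → List (Int × Int × Int)
  | [] => []
  | x :: xs => if x ∈ seen then dGo seen xs else x :: dGo (x :: seen) xs

theorem dGo_congr (s₁ s₂ : List (Int × Int × Int)) (l : List (Int × Int × Int))
    (h : ∀ x, x ∈ s₁ ↔ x ∈ s₂) : dGo s₁ l = dGo s₂ l := by
  induction l generalizing s₁ s₂ with
  | nil => rfl
  | cons x xs ih =>
    simp only [dGo]
    by_cases hx : x ∈ s₁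
    · rw [if_pos hx, if_pos ((h x).1 hx)]; exact ih _ _ h
    · rw [if_neg hx, if_neg (fun hc => hx ((h x).2 hc))]
      refine congrArg _ (ih _ _ ?_)
      intro y; simp [h y]

theorem mem_dGo_of_mem (l : List (Int × Int × Int)) :
    ∀ S x, x ∈ l → x ∈ S ∨ x ∈ dGo S l := by
  induction l with
  | nil => intro S x h; cases h
  | cons a xs ih =>
    intro S x h
    simp only [dGo]
    by_cases ha : a ∈ S
    · rw [if_pos ha]
      rcases List.mem_cons.1 h with rfl | h
      · exact Or.inl ha
      · exact ih S x h
    · rw [if_neg ha]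
      rcases List.mem_cons.1 h with rfl | h
      · exact Or.inr (List.mem_cons_self)
      · rcases ih (a :: S) x h with hS | hd
        · rcases List.mem_cons.1 hS with rfl | hS
          · exact Or.inr List.mem_cons_self
          · exact Or.inl hS
        · exact Or.inr (List.mem_cons_of_mem _ hd)

theorem not_mem_seen_of_mem_dGo (l : List (Int × Int × Int)) :
    ∀ S y, y ∈ dGo S l → y ∉ S := by
  induction l with
  | nil => intro S y h; cases h
  | cons x xs ih =>
    intro S y h
    simp only [dGo] at h
    by_cases hx : x ∈ S
    · rw [if_pos hx] at h; exact ih S y h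
    · rw [if_neg hx] at h
      rcases List.mem_cons.1 h with rfl | h
      · exact hx
      · intro hy; exact (ih _ _ h) (List.mem_cons_of_mem _ hy)

theorem nodup_dGo (l : List (Int × Int × Int)) : ∀ S, (dGo S l).Nodup := by
  induction l with
  | nil => intro S; exact List.nodup_nil
  | cons x xs ih =>
    intro S
    simp only [dGo]
    by_cases hx : x ∈ S
    · rw [if_pos hx]; exact ih S
    · rw [if_neg hx]
      refine List.nodup_cons.2 ⟨?_, ih _⟩
      intro hc
      exact (not_mem_seen_of_mem_dGo xs (x :: S) x hc) List.mem_cons_self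

theorem dGo_eq_nil (l S : List (Int × Int × Int)) (h : ∀ x ∈ l, x ∈ S) : dGo S l = [] := by
  induction l with
  | nil => rfl
  | cons x xs ih =>
    simp only [dGo, if_pos (h x List.mem_cons_self)]
    exact ih (fun y hy => h y (List.mem_cons_of_mem _ hy))

theorem dGo_eq_filter (l : List (Int × Int × Int)) :
    ∀ S₁ S₂, (∀ x, x ∈ S₁ → x ∈ S₂) →
      dGo S₂ l = (dGo S₁ l).filter (fun y => !decide (y ∈ S₂)) := by
  induction l with
  | nil => intro _ _ _; rfl
  | cons x xs ih =>
    intro S₁ S₂ hsub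
    by_cases h2 : x ∈ S₂
    · by_cases h1 : x ∈ S₁
      · simp only [dGo, if_pos h1, if_pos h2]
        exact ih S₁ S₂ hsub
      · simp only [dGo, if_pos h2, if_neg h1]
        rw [List.filter_cons_of_neg (by simp [h2])]
        exact ih (x :: S₁) S₂ (by
          intro y hy
          rcases List.mem_cons.1 hy with rfl | hy
          · exact h2
          · exact hsub y hy)
    · have h1 : x ∉ S₁ := fun hc => h2 (hsub x hc)
      simp only [dGo, if_neg h1, if_neg h2]
      rw [List.filter_cons_of_pos (by simp [h2])]
      refine congrArg _ ?_
      rw [ih (x :: S₁) (x :: S₂) (by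
        intro y hy
        rcases List.mem_cons.1 hy with rfl | hy
        · exact List.mem_cons_self
        · exact List.mem_cons_of_mem _ (hsub y hy))]
      refine List.filter_congr ?_
      intro y hy
      have hyn := not_mem_seen_of_mem_dGo xs (x :: S₁) y hy
      have : y ≠ x := fun hxy => hyn (hxy ▸ List.mem_cons_self)
      simp [List.mem_cons, this]

-- pairs contributed so far: each element of T paired with everything after it in T ++ R
def pPre : List (Int × Int × Int) → List (Int × Int × Int) → List ((Int × Int × Int) × (Int × Int × Int))
  | [], _ => []
  | t :: T, R => (T ++ R).map (fun y => (t, y)) ++ pPre T R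

theorem fst_mem_of_mem_pPre (T R : List (Int × Int × Int)) (a b : Int × Int × Int)
    (h : (a, b) ∈ pPre T R) : a ∈ T := by
  induction T with
  | nil => cases h
  | cons t T ih =>
    simp only [pPre, List.mem_append] at h
    rcases h with h | h
    · rcases List.mem_map.1 h with ⟨y, _, hy⟩
      cases hy; exact List.mem_cons_self
    · exact List.mem_cons_of_mem _ (ih h)

theorem snd_mem_of_mem_pPre (T R : List (Int × Int × Int)) (a b : Int × Int × Int)
    (h : (a, b) ∈ pPre T R) : b ∈ T ++ R := by
  induction T with
  | nil => cases h
  | cons t T ih =>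
    simp only [pPre, List.mem_append] at h
    rcases h with h | h
    · rcases List.mem_map.1 h with ⟨y, hy, he⟩
      cases he
      simp only [List.cons_append, List.mem_cons, List.mem_append] at hy ⊢
      tauto
    · have := ih h
      simp only [List.mem_append] at this ⊢
      simp only [List.mem_cons]
      tauto

theorem mem_pPre_of_split (T1 T2 R : List (Int × Int × Int)) (a b : Int × Int × Int)
    (hb : b ∈ T2 ++ R) : (a, b) ∈ pPre (T1 ++ a :: T2) R := by
  induction T1 with
  | nil =>
    simp only [List.nil_append, pPre, List.mem_append]
    exact Or.inl (List.mem_map.2 ⟨b, hb, rfl⟩)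
  | cons t T1 ih =>
    simp only [List.cons_append, pPre, List.mem_append]
    exact Or.inr ih

theorem pPre_snoc (T R : List (Int × Int × Int)) (j : Int × Int × Int) :
    pPre (T ++ [j]) R = pPre T (j :: R) ++ R.map (fun y => (j, y)) := by
  induction T with
  | nil => simp [pPre]
  | cons t T ih =>
    simp only [List.cons_append, pPre, ih, List.append_assoc]
    refine congrArg₂ _ ?_ rfl
    refine congrArg _ ?_
    simp

-- the inner loop, characterized: s = s0 ++ (j1,·)-pairs over D already added this pass
theorem innerA_spec (j1 : Int × Int × Int) (s0 : List ((Int × Int × Int) × (Int × Int × Int)))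
    (C : List (Int × Int × Int))
    (hC : ∀ v, v ∈ C ↔ (v = j1 ∨ (j1, v) ∈ s0 ∨ (v, j1) ∈ s0)) :
    ∀ (l D : List (Int × Int × Int)),
      pvInnerA j1 l (s0 ++ D.map (fun y => (j1, y))) =
        (s0 ++ (D ++ dGo (C ++ D) l).map (fun y => (j1, y)),
         (dGo (C ++ D) l).map (fun y => (j1, y))) := by
  intro l
  induction l with
  | nil => intro D; simp [pvInnerA, dGo]
  | cons x xs ih =>
    intro D
    by_cases hxj : j1 = x
    · -- 'if j1 == j2: continue' branch; dGo also skips since x = j1 ∈ C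
      subst hxj
      have hxC : j1 ∈ C ++ D := List.mem_append.2 (Or.inl ((hC j1).2 (Or.inl rfl)))
      simp only [pvInnerA, dGo, if_pos hxC]
      exact ih D
    · have hmem : ((j1, x) ∈ s0 ++ D.map (fun y => (j1, y)) ∨
          (x, j1) ∈ s0 ++ D.map (fun y => (j1, y))) ↔ x ∈ C ++ D := by
        constructor
        · rintro (h | h)
          · rcases List.mem_append.1 h with h | h
            · exact List.mem_append.2 (Or.inl ((hC x).2 (Or.inr (Or.inl h))))
            · rcases List.mem_map.1 h with ⟨y, hy, he⟩
              cases he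
              exact List.mem_append.2 (Or.inr hy)
          · rcases List.mem_append.1 h with h | h
            · exact List.mem_append.2 (Or.inl ((hC x).2 (Or.inr (Or.inr h))))
            · rcases List.mem_map.1 h with ⟨y, hy, he⟩
              have hfst : x = j1 := congrArg Prod.fst he.symm
              exact absurd hfst.symm hxj
        · intro h
          rcases List.mem_append.1 h with h | h
          · rcases (hC x).1 h with h' | h' | h'
            · exact absurd h'.symm hxj
            · exact Or.inl (List.mem_append.2 (Or.inl h'))
            · exact Or.inr (List.mem_append.2 (Or.inl h'))
          · exact Or.inl (List.mem_append.2 (Or.inr (List.mem_map.2 ⟨x, h, rfl⟩)))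
      by_cases hxCD : x ∈ C ++ D
      · -- already connected: both skip
        have hcont : (PySem.Set.contains (s0 ++ D.map (fun y => (j1, y))) (j1, x)
            || PySem.Set.contains (s0 ++ D.map (fun y => (j1, y))) (x, j1)) = true := by
          rw [Bool.or_eq_true]
          rcases hmem.2 hxCD with h | h
          · exact Or.inl ((PySem.Set.contains_iff _ _).2 h)
          · exact Or.inr ((PySem.Set.contains_iff _ _).2 h)
        simp only [pvInnerA, if_neg hxj, if_pos hcont, dGo, if_pos hxCD]
        exact ih D
      · -- fresh pair: A adds and yields, dGo keeps x
        have hnc : ¬ ((PySem.Set.contains (s0 ++ D.map (fun y => (j1, y))) (j1, x)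
            || PySem.Set.contains (s0 ++ D.map (fun y => (j1, y))) (x, j1)) = true) := by
          intro hc
          rw [Bool.or_eq_true] at hc
          rcases hc with h | h
          · exact hxCD (hmem.1 (Or.inl ((PySem.Set.contains_iff _ _).1 h)))
          · exact hxCD (hmem.1 (Or.inr ((PySem.Set.contains_iff _ _).1 h)))
        have hnm : (j1, x) ∉ s0 ++ D.map (fun y => (j1, y)) :=
          fun h => hxCD (hmem.1 (Or.inl h))
        simp only [pvInnerA, if_neg hxj, if_neg hnc, dGo, if_neg hxCD]
        rw [PySem.Set.add_of_not_mem hnm]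
        have hre : s0 ++ D.map (fun y => (j1, y)) ++ [(j1, x)] =
            s0 ++ (D ++ [x]).map (fun y => (j1, y)) := by simp
        rw [hre, ih (D ++ [x])]
        have hcongr : dGo (C ++ (D ++ [x])) xs = dGo (x :: (C ++ D)) xs :=
          dGo_congr _ _ _ (by intro y; simp [List.mem_append, List.mem_cons]; tauto)
        simp [hcongr]

-- the outer loop
theorem outerA_spec (data : List (Int × Int × Int)) :
    ∀ (rest T R : List (Int × Int × Int)),
      dGo [] data = T ++ R → (T ++ R).Nodup → dGo T rest = R →
      pvOuterA data rest (pPre T R) = pvPairsB R := by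
  intro rest
  induction rest with
  | nil =>
    intro T R hU hnd hrest
    have : R = [] := by simpa [dGo] using hrest.symm
    subst this
    rfl
  | cons j1 rest' ih =>
    intro T R hU hnd hrest
    have hdata_mem : ∀ x ∈ data, x ∈ T ++ R := by
      intro x hx
      rcases mem_dGo_of_mem data [] x hx with h | h
      · cases h
      · rw [hU] at h; exact h
    by_cases hj : j1 ∈ T
    · -- duplicate junction: inner pass yields nothing, set unchanged
      have hC : ∀ v, v ∈ T ++ R ↔ (v = j1 ∨ (j1, v) ∈ pPre T R ∨ (v, j1) ∈ pPre T R) := by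
        intro v
        constructor
        · intro hv
          by_cases hvj : v = j1
          · exact Or.inl hvj
          · rcases List.append_of_mem hj with ⟨T1, T2, hT⟩
            rw [hT] at hv
            simp only [List.append_assoc, List.cons_append, List.mem_append, List.mem_cons] at hv
            rcases hv with hv | hv | hv
            · rcases List.append_of_mem hv with ⟨X, Y, hT1⟩
              refine Or.inr (Or.inr ?_)
              have hT' : T = X ++ v :: (Y ++ j1 :: T2) := by
                rw [hT, hT1]; simp
              rw [hT']
              exact mem_pPre_of_split X _ R v j1 (by simp)
            · exact absurd hv hvj
            · refine Or.inr (Or.inl ?_)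
              rw [hT]
              exact mem_pPre_of_split T1 T2 R j1 v (by
                simp only [List.mem_append]
                rcases hv with hv | hv
                · exact Or.inl hv
                · exact Or.inr hv)
        · rintro (rfl | h | h)
          · exact List.mem_append.2 (Or.inl hj)
          · exact snd_mem_of_mem_pPre T R j1 v h
          · exact List.mem_append.2 (Or.inl (fst_mem_of_mem_pPre T R v j1 h))
      have hinner := innerA_spec j1 (pPre T R) (T ++ R) hC data []
      simp only [List.map_nil, List.append_nil, List.nil_append] at hinner
      rw [dGo_eq_nil data (T ++ R) hdata_mem] at hinner
      simp only [List.map_nil, List.append_nil] at hinner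
      show (pvInnerA j1 data (pPre T R)).2 ++ pvOuterA data rest' (pvInnerA j1 data (pPre T R)).1 = pvPairsB R
      rw [hinner]
      simp only [List.nil_append]
      have hrest' : dGo T rest' = R := by
        simpa [dGo, hj] using hrest
      exact ih T R hU hnd hrest'
    · -- new junction: it is the head of R; inner pass pairs it with all of R.tail
      have hR : R = j1 :: dGo (j1 :: T) rest' := by
        simpa [dGo, hj] using hrest.symm
      set R' := dGo (j1 :: T) rest' with hR'
      have hC : ∀ v, v ∈ j1 :: T ↔ (v = j1 ∨ (j1, v) ∈ pPre T R ∨ (v, j1) ∈ pPre T R) := by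
        intro v
        constructor
        · intro hv
          rcases List.mem_cons.1 hv with rfl | hv
          · exact Or.inl rfl
          · rcases List.append_of_mem hv with ⟨X, Y, hT⟩
            refine Or.inr (Or.inr ?_)
            rw [hT]
            exact mem_pPre_of_split X Y R v j1 (by
              simp only [List.mem_append]
              exact Or.inr (hR ▸ List.mem_cons_self))
        · rintro (rfl | h | h)
          · exact List.mem_cons_self
          · exact absurd (fst_mem_of_mem_pPre T R j1 v h) hj
          · exact List.mem_cons_of_mem _ (fst_mem_of_mem_pPre T R v j1 h)
      have hinner := innerA_spec j1 (pPre T R) (j1 :: T) hC data []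
      simp only [List.map_nil, List.append_nil, List.nil_append] at hinner
      have hd : dGo (j1 :: T) data = R' := by
        rw [dGo_eq_filter data [] (j1 :: T) (by intro x hx; cases hx)]
        rw [hU, hR]
        have hnd' := hnd
        rw [hR] at hnd'
        rw [List.nodup_append] at hnd'
        obtain ⟨ndT, ndR, disj⟩ := hnd'
        have hj1R' : j1 ∉ R' := (List.nodup_cons.1 ndR).1
        rw [List.filter_append]
        rw [List.filter_eq_nil_iff.2 (by
          intro t ht
          simp only [Bool.not_eq_true', decide_eq_false_iff_not, not_not]
          exact List.mem_cons_of_mem _ ht)]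
        rw [List.nil_append]
        rw [List.filter_cons_of_neg (by simp)]
        refine List.filter_eq_self.2 ?_
        intro y hy
        simp only [Bool.not_eq_true', decide_eq_false_iff_not, List.mem_cons]
        rintro (rfl | hyT)
        · exact hj1R' hy
        · exact disj y hyT y (List.mem_cons_of_mem _ hy) rfl
      rw [hd] at hinner
      show (pvInnerA j1 data (pPre T R)).2 ++ pvOuterA data rest' (pvInnerA j1 data (pPre T R)).1 = pvPairsB R
      rw [hinner]
      have hs' : pPre T R ++ R'.map (fun y => (j1, y)) = pPre (T ++ [j1]) R' := by
        rw [pPre_snoc, hR]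
      simp only [hs']
      have hU' : dGo [] data = (T ++ [j1]) ++ R' := by
        rw [hU, hR]; simp
      have hnd'' : ((T ++ [j1]) ++ R').Nodup := by
        have : (T ++ [j1]) ++ R' = T ++ R := by rw [hR]; simp
        rw [this]; exact hnd
      have hrest'' : dGo (T ++ [j1]) rest' = R' := by
        rw [dGo_congr (T ++ [j1]) (j1 :: T) rest' (by intro y; simp [or_comm])]
      rw [ih (T ++ [j1]) R' hU' hnd'' hrest'']
      rw [hR]
      rfl

theorem foldB_spec (l : List (Int × Int × Int)) :
    ∀ (seen acc : List (Int × Int × Int)),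
      (l.foldl
        (fun (st : PySem.Set (Int × Int × Int) × List (Int × Int × Int)) j =>
          if PySem.Set.contains st.1 j then st else (PySem.Set.add st.1 j, st.2 ++ [j]))
        (seen, acc)).2 = acc ++ dGo seen l := by
  induction l with
  | nil => intro seen acc; simp [dGo]
  | cons x xs ih =>
    intro seen acc
    by_cases hx : x ∈ seen
    · simp only [List.foldl_cons, dGo, if_pos hx,
        if_pos ((PySem.Set.contains_iff _ _).2 hx)]
      exact ih seen acc
    · have hcb : ¬ (PySem.Set.contains seen x = true) :=
        fun hc => hx ((PySem.Set.contains_iff _ _).1 hc)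
      simp only [List.foldl_cons, dGo, if_neg hx, if_neg hcb]
      rw [PySem.Set.add_of_not_mem hx]
      rw [ih (seen ++ [x]) (acc ++ [x])]
      rw [dGo_congr (seen ++ [x]) (x :: seen) xs (by intro y; simp [or_comm])]
      simp

-- ===== VERDICT (by name: the statement is the Claim_ definition above) =====
theorem all_possible_connections_spec : Claim_equal_all_possible_connections := by
  intro data _
  show all_possible_connections data = all_possible_connections_alt data
  have halt : all_possible_connections_alt data =
      pvPairsB ((data.foldl
        (fun (st : PySem.Set (Int × Int × Int) × List (Int × Int × Int)) j =>
          if PySem.Set.contains st.1 j then st else (PySem.Set.add st.1 j, st.2 ++ [j]))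
        (PySem.Set.empty, [])).2) := rfl
  rw [halt, foldB_spec data PySem.Set.empty [], List.nil_append]
  have hP : all_possible_connections data = pvOuterA data data (pPre [] (dGo [] data)) := rfl
  rw [hP]
  exact outerA_spec data data [] (dGo [] data) (by simp) (by simpa using nodup_dGo data []) rfl
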